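-- pv_equiv track=rewrite | github.com/shubham8550/Competitive-Programing-Cpp | .vscode/sublist_disctinct_count.py | totalDistinct
-- ===== SOURCE A (Python) =====
-- def sub_lists (l):
--     lists = [[]]
--     for i in range(len(l) + 1):
--         for j in range(i):
--             lists.append(l[j: i])
--     return lists
--
-- def totalDistinct(N,A):
--     sub=sub_lists(A)
--     ds=[]
--     for i in sub:
--         if len(i)<=1:
--             continue
--         i.sort()
--         ds.append(i[-1]-i[-2])
--     return len(set(ds))
-- ===== SOURCE B (Python) =====
-- def totalDistinct(N, A):
--     n = len(A)
--     ds = set()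
--     for j in range(n - 1):
--         a, b = A[j], A[j + 1]
--         m1, m2 = (a, b) if a >= b else (b, a)
--         ds.add(m1 - m2)
--         for x in A[j + 2:]:
--             if x >= m1:
--                 m1, m2 = x, m1
--             elif x > m2:
--                 m2 = x
--             ds.add(m1 - m2)
--     return len(ds)
-- ===== Notes on version B (the rewrite author's own statement) =====
-- stated objective: faster
-- what changed: Instead of materializing every sublist and sorting each one, B scans each suffix once, maintaining the top-two elements incrementally and inserting each (max - second max) into a set.
import Mathlib
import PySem

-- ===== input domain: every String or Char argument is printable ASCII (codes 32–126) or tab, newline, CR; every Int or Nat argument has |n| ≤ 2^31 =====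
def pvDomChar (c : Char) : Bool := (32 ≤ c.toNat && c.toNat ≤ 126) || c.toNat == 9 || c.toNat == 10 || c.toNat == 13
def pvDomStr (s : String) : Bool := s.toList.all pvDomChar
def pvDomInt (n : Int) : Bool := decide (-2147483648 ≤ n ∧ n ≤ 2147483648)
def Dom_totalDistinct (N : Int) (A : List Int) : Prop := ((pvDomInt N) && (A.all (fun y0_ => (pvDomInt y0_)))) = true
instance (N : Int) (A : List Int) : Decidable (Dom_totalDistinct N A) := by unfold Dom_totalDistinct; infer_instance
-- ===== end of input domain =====

-- B replaces A's "enumerate every sublist, sort each" by a per-start incremental top-two scan collecting diffs in a set; same return value.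


-- ===== PORT A =====
-- sub_lists(l): [[]] plus every slice l[j:i]
def subLists (l : List Int) : List (List Int) :=
  (PySem.List.pyRange 0 ((l.length : Int) + 1) 1).foldl (fun lists i =>
    (PySem.List.pyRange 0 i 1).foldl (fun lists j =>
      lists ++ [PySem.List.slice l (some j) (some i)]) lists) [[]]

def totalDistinct (N : Int) (A : List Int) : Int :=
  let sub := subLists A
  let ds := sub.foldl (fun ds i =>
    if i.length ≤ 1 then ds
    else
      let s := PySem.List.sorted i (fun x => x) false
      ds ++ [PySem.List.pyGetD s (-1) 0 - PySem.List.pyGetD s (-2) 0]) []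
  PySem.Set.len (PySem.Set.ofList ds)

-- ===== PORT B =====
-- body of B's inner loop: update the running top-two p = (m1, m2) with x and record p.1 - p.2
def bStep (st : PySem.Set Int × Int × Int) (x : Int) : PySem.Set Int × Int × Int :=
  let (ds, m1, m2) := st
  let p := if x ≥ m1 then (x, m1) else if x > m2 then (m1, x) else (m1, m2)
  (PySem.Set.add ds (p.1 - p.2), p.1, p.2)

-- body of B's outer loop over the start index j
def bOuter (A : List Int) (ds : PySem.Set Int) (j : Int) : PySem.Set Int :=
  let a := PySem.List.pyGetD A j 0
  let b := PySem.List.pyGetD A (j + 1) 0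
  let p := if a ≥ b then (a, b) else (b, a)
  let ds := PySem.Set.add ds (p.1 - p.2)
  ((PySem.List.slice A (some (j + 2)) none).foldl bStep (ds, p.1, p.2)).1

def totalDistinct_alt (N : Int) (A : List Int) : Int :=
  let n : Int := A.length
  PySem.Set.len ((PySem.List.pyRange 0 (n - 1) 1).foldl (bOuter A) PySem.Set.empty)

-- ===== PRECONDITION & SPEC =====
def Spec_totalDistinct (N : Int) (A : List Int) (out : Int) : Prop := out = totalDistinct_alt N A
instance (N : Int) (A : List Int) (out : Int) : Decidable (Spec_totalDistinct N A out) := by unfold Spec_totalDistinct; infer_instance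

-- ===== CLAIM (what is proved, stated in full; the proofs are below) =====
def Claim_equal_totalDistinct : Prop := ∀ (N : Int) (A : List Int), Dom_totalDistinct N A → Spec_totalDistinct N A (totalDistinct N A)

-- ===== LEMMAS AND PROOFS =====

-- (max − second max) of xs, computed the way A computes it on each sublist
def diffVal (xs : List Int) : Int :=
  let s := PySem.List.sorted xs (fun x => x) false
  PySem.List.pyGetD s (-1) 0 - PySem.List.pyGetD s (-2) 0

-- the list A's loop accumulates
def dsA (A : List Int) : List Int :=
  (subLists A).foldl (fun ds i => if i.length ≤ 1 then ds else ds ++ [diffVal i]) []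

-- the diffs both programs range over: diffVal of every length-≥2 contiguous sublist
def P (A : List Int) (x : Int) : Prop :=
  ∃ j t : ℕ, j + t + 2 ≤ A.length ∧ x = diffVal ((A.drop j).take (t + 2))

-- invariant of B's scan: m1 and m2 are the two largest elements of the multiset S scanned so far
def TopTwo (S : List Int) (m1 m2 : Int) : Prop :=
  ∃ ws : List Int, (ws ++ [m2, m1]).Perm S ∧ (ws ++ [m2, m1]).Pairwise (· ≤ ·)

theorem totalDistinct_eq_dsA (N : Int) (A : List Int) :
    totalDistinct N A = PySem.Set.len (PySem.Set.ofList (dsA A)) := rfl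

theorem diffVal_of_inv {S : List Int} {m1 m2 : Int} (h : TopTwo S m1 m2) :
    diffVal S = m1 - m2 := by
  obtain ⟨ws, hp, hpw⟩ := h
  have hs : PySem.List.sorted S (fun x => x) false = ws ++ [m2, m1] :=
    PySem.List.sorted_id_eq_of_perm_of_pairwise S _ hp hpw
  unfold diffVal
  simp only [hs]
  have h1 : PySem.List.pyGetD (ws ++ [m2, m1]) (-1) 0 = m1 := by
    simp [PySem.List.pyGetD, PySem.List.pyGet?_neg_one]
  have h2 : PySem.List.pyGetD (ws ++ [m2, m1]) (-2) 0 = m2 := by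
    have hlen : 2 ≤ (ws ++ [m2, m1]).length := by simp
    simp [PySem.List.pyGetD, PySem.List.pyGet?_neg_ofNat _ 2 (by omega) hlen]
  rw [h1, h2]

theorem inv_base (a b : Int) :
    TopTwo [a, b] (if a ≥ b then (a, b) else (b, a)).1 (if a ≥ b then (a, b) else (b, a)).2 := by
  by_cases hab : a ≥ b
  · exact ⟨[], by simp [hab, List.Perm.swap a b []], by simp [hab]⟩
  · exact ⟨[], by simp [hab], by simp [hab]; omega⟩

theorem inv_step {S : List Int} {m1 m2 : Int} (h : TopTwo S m1 m2) (x : Int) :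
    TopTwo (S ++ [x])
      (if x ≥ m1 then (x, m1) else if x > m2 then (m1, x) else (m1, m2)).1
      (if x ≥ m1 then (x, m1) else if x > m2 then (m1, x) else (m1, m2)).2 := by
  obtain ⟨ws, hp, hpw⟩ := h
  have hws : ∀ w ∈ ws, w ≤ m2 ∧ w ≤ m1 := by
    intro w hw
    have h3 := List.pairwise_append.1 hpw
    exact ⟨h3.2.2 w hw m2 (by simp), h3.2.2 w hw m1 (by simp)⟩
  have hm : m2 ≤ m1 := by
    have h3 := List.pairwise_append.1 hpw
    simpa using h3.2.1
  by_cases h1 : x ≥ m1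
  · refine ⟨ws ++ [m2], ?_, ?_⟩
    · simp only [if_pos h1]
      have he : (ws ++ [m2]) ++ [m1, x] = (ws ++ [m2, m1]) ++ [x] := by simp
      rw [he]; exact hp.append_right _
    · simp only [if_pos h1]
      have he : (ws ++ [m2]) ++ [m1, x] = (ws ++ [m2, m1]) ++ [x] := by simp
      rw [he]
      refine List.pairwise_append.2 ⟨hpw, by simp, ?_⟩
      intro a ha b hb
      simp at hb; subst hb
      rcases List.mem_append.1 ha with h2 | h2
      · exact le_trans (hws a h2).2 h1
      · simp at h2; rcases h2 with h2 | h2 <;> subst h2 <;> omega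
  · by_cases h2 : x > m2
    · refine ⟨ws ++ [m2], ?_, ?_⟩
      · simp only [if_neg h1, if_pos h2]
        have he : (ws ++ [m2]) ++ [x, m1] = ws ++ ([m2] ++ [x, m1]) := by simp
        rw [he]
        refine List.Perm.trans ?_ (hp.append_right [x])
        have he2 : (ws ++ [m2, m1]) ++ [x] = ws ++ ([m2] ++ [m1, x]) := by simp
        rw [he2]
        exact (List.Perm.append_left ws (List.Perm.cons m2 (List.Perm.swap m1 x [])))
      · simp only [if_neg h1, if_pos h2]
        refine List.pairwise_append.2 ⟨List.pairwise_append.2 ⟨(List.pairwise_append.1 hpw).1, by simp, ?_⟩, by simp; omega, ?_⟩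
        · intro a ha b hb; simp at hb; subst hb; exact (hws a ha).1
        · intro a ha b hb
          simp at hb
          rcases List.mem_append.1 ha with h3 | h3
          · have ha4 := (hws a h3).1
            rcases hb with hb | hb <;> subst hb <;> omega
          · simp at h3; subst h3; rcases hb with hb | hb <;> omega
    · refine ⟨PySem.List.sorted (ws ++ [x]) (fun y => y) false, ?_, ?_⟩
      · simp only [if_neg h1, if_neg h2]
        refine List.Perm.trans ((PySem.List.sorted_perm _ _ _).append_right _) ?_
        have he : (ws ++ [x]) ++ [m2, m1] = ws ++ ([x] ++ [m2, m1]) := by simp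
        have he2 : (ws ++ [m2, m1]) ++ [x] = ws ++ ([m2, m1] ++ [x]) := by simp
        rw [he]
        refine List.Perm.trans (List.Perm.append_left ws (List.perm_append_comm)) ?_
        rw [← he2]
        exact hp.append_right _
      · simp only [if_neg h1, if_neg h2]
        refine List.pairwise_append.2 ⟨?_, by simp; omega, ?_⟩
        · have := PySem.List.sorted_pairwise (ws ++ [x]) (fun y => y)
          simpa using this
        · intro a ha b hb
          have ha2 : a ∈ ws ++ [x] := (PySem.List.mem_sorted _ _ _ _).1 ha
          have ha3 : a ≤ m2 := by
            rcases List.mem_append.1 ha2 with h3 | h3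
            · exact (hws a h3).1
            · simp at h3; subst h3; omega
          simp at hb; rcases hb with hb | hb <;> subst hb <;> omega

theorem inner_mem (rest : List Int) :
    ∀ (ds : PySem.Set Int) (m1 m2 : Int) (S : List Int), TopTwo S m1 m2 →
    ∀ x, x ∈ (rest.foldl bStep (ds, m1, m2)).1 ↔
      x ∈ ds ∨ ∃ t : ℕ, t < rest.length ∧ x = diffVal (S ++ rest.take (t + 1)) := by
  induction rest with
  | nil => intro ds m1 m2 S _ x; simp
  | cons x0 r ih =>
    intro ds m1 m2 S hInv x
    have hInv' := inv_step hInv x0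
    have hstep : bStep (ds, m1, m2) x0 =
        (PySem.Set.add ds ((if x0 ≥ m1 then (x0, m1) else if x0 > m2 then (m1, x0) else (m1, m2)).1
          - (if x0 ≥ m1 then (x0, m1) else if x0 > m2 then (m1, x0) else (m1, m2)).2),
         (if x0 ≥ m1 then (x0, m1) else if x0 > m2 then (m1, x0) else (m1, m2)).1,
         (if x0 ≥ m1 then (x0, m1) else if x0 > m2 then (m1, x0) else (m1, m2)).2) := by
      rfl
    have hd : (if x0 ≥ m1 then (x0, m1) else if x0 > m2 then (m1, x0) else (m1, m2)).1
        - (if x0 ≥ m1 then (x0, m1) else if x0 > m2 then (m1, x0) else (m1, m2)).2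
        = diffVal (S ++ [x0]) := (diffVal_of_inv hInv').symm
    rw [List.foldl_cons, hstep, hd, ih _ _ _ _ hInv' x, PySem.Set.mem_add]
    constructor
    · rintro ((hx | hx) | ⟨t, ht, hx⟩)
      · exact Or.inl hx
      · exact Or.inr ⟨0, by simp, by simpa using hx⟩
      · refine Or.inr ⟨t + 1, by simpa using ht, ?_⟩
        simpa [List.append_assoc] using hx
    · rintro (hx | ⟨t, ht, hx⟩)
      · exact Or.inl (Or.inl hx)
      · cases t with
        | zero => exact Or.inl (Or.inr (by simpa using hx))
        | succ t' =>
          refine Or.inr ⟨t', by simpa using ht, ?_⟩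
          simpa [List.append_assoc] using hx

theorem inner_nodup (rest : List Int) :
    ∀ (ds : PySem.Set Int) (m1 m2 : Int), ds.Nodup →
    (rest.foldl bStep (ds, m1, m2)).1.Nodup := by
  induction rest with
  | nil => intro ds m1 m2 h; simpa using h
  | cons x0 r ih =>
    intro ds m1 m2 h
    rw [List.foldl_cons]
    show ((List.foldl bStep (bStep (ds, m1, m2) x0) r).1).Nodup
    have he : bStep (ds, m1, m2) x0
        = ((bStep (ds, m1, m2) x0).1, (bStep (ds, m1, m2) x0).2.1, (bStep (ds, m1, m2) x0).2.2) := rfl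
    rw [he]
    apply ih
    show (bStep (ds, m1, m2) x0).1.Nodup
    simp only [bStep]
    exact PySem.Set.nodup_add _ _ h

theorem take_two {A : List Int} {j : ℕ} (h1 : j < A.length) (h2 : j + 1 < A.length) :
    (A.drop j).take 2 = [A[j], A[j+1]] := by
  rw [List.drop_eq_getElem_cons h1, List.drop_eq_getElem_cons h2]
  rfl

theorem bOuter_mem {A : List Int} {j : ℕ} (hj : j + 2 ≤ A.length) (ds : PySem.Set Int) (x : Int) :
    x ∈ bOuter A ds (j : Int) ↔
      x ∈ ds ∨ ∃ t : ℕ, j + t + 2 ≤ A.length ∧ x = diffVal ((A.drop j).take (t + 2)) := by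
  have h1 : j < A.length := by omega
  have h2 : j + 1 < A.length := by omega
  have ha : PySem.List.pyGetD A (j : Int) 0 = A[j] := by
    rw [PySem.List.pyGetD_natCast, List.getD_eq_getElem A 0 h1]
  have hb : PySem.List.pyGetD A ((j : Int) + 1) 0 = A[j+1] := by
    have hc : (j : Int) + 1 = ((j + 1 : ℕ) : Int) := by push_cast; ring
    rw [hc, PySem.List.pyGetD_natCast, List.getD_eq_getElem A 0 h2]
  have hslice : PySem.List.slice A (some ((j : Int) + 2)) none = A.drop (j + 2) := by
    have ht : ((j : Int) + 2).toNat = j + 2 := by omega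
    rw [PySem.List.slice_from A (by positivity), ht]
  have hS0 : (A.drop j).take 2 = [A[j], A[j+1]] := take_two h1 h2
  have hInv : TopTwo ((A.drop j).take 2)
      (if A[j] ≥ A[j+1] then (A[j], A[j+1]) else (A[j+1], A[j])).1
      (if A[j] ≥ A[j+1] then (A[j], A[j+1]) else (A[j+1], A[j])).2 := by
    rw [hS0]; exact inv_base _ _
  unfold bOuter
  simp only [ha, hb, hslice]
  rw [inner_mem _ _ _ _ _ hInv x, PySem.Set.mem_add]
  have hbase : (if A[j] ≥ A[j+1] then (A[j], A[j+1]) else (A[j+1], A[j])).1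
      - (if A[j] ≥ A[j+1] then (A[j], A[j+1]) else (A[j+1], A[j])).2
      = diffVal ((A.drop j).take 2) := (diffVal_of_inv hInv).symm
  rw [hbase]
  have hjoin : ∀ t : ℕ, (A.drop j).take 2 ++ (A.drop (j + 2)).take (t + 1)
      = (A.drop j).take (t + 3) := by
    intro t
    have h23 : (t + 3) = 2 + (t + 1) := by omega
    rw [h23]
    conv_rhs => rw [List.take_add]
    rw [List.drop_drop]
  have hlen : (A.drop (j + 2)).length = A.length - (j + 2) := by simp
  constructor
  · rintro ((hx | hx) | ⟨t, ht, hx⟩)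
    · exact Or.inl hx
    · exact Or.inr ⟨0, by omega, hx⟩
    · refine Or.inr ⟨t + 1, by omega, ?_⟩
      rw [hjoin t] at hx
      have h13 : t + 1 + 2 = t + 3 := by omega
      rw [h13]; exact hx
  · rintro (hx | ⟨t, ht, hx⟩)
    · exact Or.inl (Or.inl hx)
    · cases t with
      | zero => exact Or.inl (Or.inr hx)
      | succ t' =>
        refine Or.inr ⟨t', by omega, ?_⟩
        rw [hjoin t']
        have h13 : t' + 1 + 2 = t' + 3 := by omega
        rw [h13] at hx; exact hx

theorem bOuter_nodup (A : List Int) (ds : PySem.Set Int) (j : Int) (h : ds.Nodup) :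
    (bOuter A ds j).Nodup := by
  unfold bOuter
  exact inner_nodup _ _ _ _ (PySem.Set.nodup_add _ _ h)

theorem outer_mem (A : List Int) (m : ℕ) (hm : m + 1 ≤ A.length) :
    ∀ (ds : PySem.Set Int) (x : Int),
      x ∈ (PySem.List.pyRange 0 (m : Int) 1).foldl (bOuter A) ds ↔
      x ∈ ds ∨ ∃ j t : ℕ, j < m ∧ j + t + 2 ≤ A.length ∧ x = diffVal ((A.drop j).take (t + 2)) := by
  induction m with
  | zero =>
    intro ds x
    have h0 : PySem.List.pyRange 0 ((0 : ℕ) : Int) 1 = [] := rfl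
    rw [h0]
    simp
  | succ m ih =>
    intro ds x
    have hr : PySem.List.pyRange 0 ((m + 1 : ℕ) : Int) 1
        = PySem.List.pyRange 0 (m : Int) 1 ++ [(m : Int)] := by
      push_cast
      exact PySem.List.pyRange_one_succ_right (by positivity)
    rw [hr, List.foldl_append, List.foldl_cons, List.foldl_nil]
    rw [bOuter_mem (by omega) _ x, ih (by omega) ds x]
    constructor
    · rintro ((hx | ⟨j, t, hjt⟩) | ⟨t, ht⟩)
      · exact Or.inl hx
      · exact Or.inr ⟨j, t, by omega, hjt.2.1, hjt.2.2⟩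
      · exact Or.inr ⟨m, t, by omega, ht.1, ht.2⟩
    · rintro (hx | ⟨j, t, hj, hle, hx⟩)
      · exact Or.inl (Or.inl hx)
      · by_cases hjm : j < m
        · exact Or.inl (Or.inr ⟨j, t, hjm, hle, hx⟩)
        · have hjm2 : j = m := by omega
          subst hjm2
          exact Or.inr ⟨t, hle, hx⟩

theorem outer_nodup (A : List Int) (m : ℕ) :
    ∀ (ds : PySem.Set Int), ds.Nodup → ((PySem.List.pyRange 0 (m : Int) 1).foldl (bOuter A) ds).Nodup := by
  induction m with
  | zero => intro ds h; exact h
  | succ m ih =>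
    intro ds h
    have hr : PySem.List.pyRange 0 ((m + 1 : ℕ) : Int) 1
        = PySem.List.pyRange 0 (m : Int) 1 ++ [(m : Int)] := by
      push_cast
      exact PySem.List.pyRange_one_succ_right (by positivity)
    rw [hr, List.foldl_append, List.foldl_cons, List.foldl_nil]
    exact bOuter_nodup A _ _ (ih ds h)

theorem memB (A : List Int) (x : Int) :
    x ∈ (PySem.List.pyRange 0 ((A.length : Int) - 1) 1).foldl (bOuter A) PySem.Set.empty ↔ P A x := by
  cases hA : A.length with
  | zero =>
    simp only [Nat.cast_zero]
    have h0 : PySem.List.pyRange 0 ((0 : Int) - 1) 1 = [] := rfl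
    rw [h0]
    constructor
    · intro h; cases h
    · rintro ⟨j, t, hle, _⟩; omega
  | succ k =>
    have hc : ((k + 1 : ℕ) : Int) - 1 = ((k : ℕ) : Int) := by push_cast; ring
    rw [hc, outer_mem A k (by omega) _ x]
    constructor
    · rintro (hx | ⟨j, t, _, hle, hx⟩)
      · cases hx
      · exact ⟨j, t, hle, hx⟩
    · rintro ⟨j, t, hle, hx⟩
      exact Or.inr ⟨j, t, by omega, hle, hx⟩

theorem nodupB (A : List Int) :
    ((PySem.List.pyRange 0 ((A.length : Int) - 1) 1).foldl (bOuter A) PySem.Set.empty).Nodup := by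
  cases hA : A.length with
  | zero =>
    simp only [Nat.cast_zero]
    have h0 : PySem.List.pyRange 0 ((0 : Int) - 1) 1 = [] := rfl
    rw [h0]
    exact List.nodup_nil
  | succ k =>
    have hc : ((k + 1 : ℕ) : Int) - 1 = ((k : ℕ) : Int) := by push_cast; ring
    rw [hc]
    exact outer_nodup A k PySem.Set.empty List.nodup_nil

theorem mem_subLists {A : List Int} {sub : List Int} :
    sub ∈ subLists A ↔ sub = [] ∨ ∃ i j : Int, 0 ≤ j ∧ j < i ∧ i < (A.length : Int) + 1 ∧
      sub = PySem.List.slice A (some j) (some i) := by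
  unfold subLists
  simp only [PySem.List.foldl_append_singleton_eq_map]
  rw [PySem.List.foldl_append_eq_flatMap]
  simp only [List.mem_append, List.mem_flatMap, List.mem_map, PySem.List.mem_pyRange_one,
    List.mem_singleton]
  constructor
  · rintro (h | ⟨i, ⟨_, hi⟩, j, ⟨hj0, hji⟩, hsub⟩)
    · exact Or.inl h
    · exact Or.inr ⟨i, j, hj0, hji, hi, hsub.symm⟩
  · rintro (h | ⟨i, j, hj0, hji, hi, hsub⟩)
    · exact Or.inl h
    · exact Or.inr ⟨i, ⟨by omega, hi⟩, j, ⟨hj0, hji⟩, hsub.symm⟩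

theorem memA (A : List Int) (x : Int) : x ∈ dsA A ↔ P A x := by
  have hstep : (fun (ds : List Int) (i : List Int) => if i.length ≤ 1 then ds else ds ++ [diffVal i])
      = (fun ds i => if (fun (i : List Int) => decide (1 < i.length)) i = true then ds ++ [diffVal i] else ds) := by
    funext ds i
    by_cases h : i.length ≤ 1
    · rw [if_pos h, if_neg (by simpa using h)]
    · rw [if_neg h, if_pos (by simpa using Nat.lt_of_not_le h)]
  unfold dsA
  rw [hstep, PySem.List.foldl_append_if, List.nil_append]
  rw [List.mem_map]
  constructor
  · rintro ⟨sub, hsub, hx⟩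
    rw [List.mem_filter] at hsub
    obtain ⟨hmem, hlen⟩ := hsub
    have hlen2 : 1 < sub.length := by simpa using hlen
    rcases mem_subLists.1 hmem with h | ⟨i, j, hj0, hji, hi, hs⟩
    · subst h; simp at hlen2
    · have hslice : sub = (A.drop j.toNat).take (i.toNat - j.toNat) := by
        rw [hs, PySem.List.slice_toNat A hj0 (by omega)]
      have hlen3 : sub.length = min (i.toNat - j.toNat) (A.length - j.toNat) := by
        rw [hslice]; simp
      have hin : i.toNat ≤ A.length := by omega
      have hij : j.toNat + 2 ≤ i.toNat := by omega
      refine ⟨j.toNat, i.toNat - j.toNat - 2, by omega, ?_⟩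
      rw [← hx, hslice]
      have h22 : i.toNat - j.toNat - 2 + 2 = i.toNat - j.toNat := by omega
      rw [h22]
  · rintro ⟨j, t, hle, hx⟩
    refine ⟨(A.drop j).take (t + 2), ?_, hx.symm⟩
    rw [List.mem_filter]
    constructor
    · refine mem_subLists.2 (Or.inr ⟨(j + t + 2 : ℕ), (j : ℕ), by positivity, by omega, by omega, ?_⟩)
      rw [PySem.List.slice_toNat A (by positivity) (by positivity)]
      congr 1; omega
    · simp
      omega

-- ===== VERDICT (by name: the statement is the Claim_ definition above) =====
theorem totalDistinct_spec : Claim_equal_totalDistinct := by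
  intro N A _
  show totalDistinct N A = totalDistinct_alt N A
  rw [totalDistinct_eq_dsA]
  show _ = PySem.Set.len ((PySem.List.pyRange 0 ((A.length : Int) - 1) 1).foldl (bOuter A) PySem.Set.empty)
  have hperm : (PySem.Set.ofList (dsA A)).Perm
      ((PySem.List.pyRange 0 ((A.length : Int) - 1) 1).foldl (bOuter A) PySem.Set.empty) :=
    (List.perm_ext_iff_of_nodup (PySem.Set.nodup_ofList _) (nodupB A)).2
      (fun a => by rw [PySem.Set.mem_ofList, memA, ← memB])
  simp [PySem.Set.len, hperm.length_eq]
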